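-- pv_equiv track=rewrite | github.com/vlkardakov/Bots | artest07-03-25.py | replace_string
-- ===== SOURCE A (Python) =====
-- def replace_string(input_str):
--     # Словарь для замены
--     # '': '{Lshift down}{Lshift up}',
--     replacements = {
--         '!': '{Lshift down}1{Lshift up}',
--         '?': '{Lshift down}7{Lshift up}',
--         ':': '{Lshift down}6{Lshift up}',
--         '*': '{Lshift down}8{Lshift up}',
--         '+': '{Lshift down}={Lshift up}',
--         '\n': ' '
--     }
--
--     # Создаем новую строку с заменами
--     output_str = ""
--     for char in input_str:
--         if char in replacements:
--             output_str += replacements[char]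
--         else:
--             output_str += char
--
--     return output_str
-- ===== SOURCE B (Python) =====
-- def replace_string(input_str):
--     return (input_str
--             .replace('!', '{Lshift down}1{Lshift up}')
--             .replace('?', '{Lshift down}7{Lshift up}')
--             .replace(':', '{Lshift down}6{Lshift up}')
--             .replace('*', '{Lshift down}8{Lshift up}')
--             .replace('+', '{Lshift down}={Lshift up}')
--             .replace('\n', ' '))
-- ===== Notes on version B (the rewrite author's own statement) =====
-- stated objective: faster
-- what changed: Replaced the per-character dict-lookup accumulation loop with six chained str.replace passes (safe because no replacement text contains any key).
import Mathlib
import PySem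

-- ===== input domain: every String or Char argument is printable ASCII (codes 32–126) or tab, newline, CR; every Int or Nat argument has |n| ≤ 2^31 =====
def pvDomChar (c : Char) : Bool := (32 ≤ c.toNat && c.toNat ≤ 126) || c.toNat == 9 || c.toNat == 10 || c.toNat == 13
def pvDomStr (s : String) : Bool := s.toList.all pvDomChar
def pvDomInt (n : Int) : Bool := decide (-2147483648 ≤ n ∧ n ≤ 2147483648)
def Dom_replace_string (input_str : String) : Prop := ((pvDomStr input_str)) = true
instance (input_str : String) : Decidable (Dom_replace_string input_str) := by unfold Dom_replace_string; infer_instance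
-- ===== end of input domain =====

-- B replaces A's per-character dict-lookup accumulation loop with six chained str.replace passes (idiomatic; order safe: no replacement text contains any key).

-- ===== PORT A =====
-- A-side helper: the 'replacements' dict (Python keys are 1-char strings iterated char by char; ported with Char keys)
def pvReplacements : PySem.Dict Char (List Char) :=
  (((((PySem.Dict.empty.insert '!' "{Lshift down}1{Lshift up}".toList).insert
      '?' "{Lshift down}7{Lshift up}".toList).insert
      ':' "{Lshift down}6{Lshift up}".toList).insert
      '*' "{Lshift down}8{Lshift up}".toList).insert
      '+' "{Lshift down}={Lshift up}".toList).insert '\n' " ".toList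

def replace_string (input_str : String) : String :=
  String.ofList
    (input_str.toList.foldl
      (fun acc c =>
        if pvReplacements.contains c then acc ++ pvReplacements.getD c []
        else acc ++ [c])
      [])

-- ===== PORT B =====
def replace_string_alt (input_str : String) : String :=
  PySem.Str.replace
    (PySem.Str.replace
      (PySem.Str.replace
        (PySem.Str.replace
          (PySem.Str.replace
            (PySem.Str.replace input_str "!" "{Lshift down}1{Lshift up}")
            "?" "{Lshift down}7{Lshift up}")
          ":" "{Lshift down}6{Lshift up}")
        "*" "{Lshift down}8{Lshift up}")
      "+" "{Lshift down}={Lshift up}")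
    "\n" " "

-- ===== PRECONDITION & SPEC =====
def Spec_replace_string (input_str : String) (out : String) : Prop := out = replace_string_alt input_str
instance (input_str : String) (out : String) : Decidable (Spec_replace_string input_str out) := by unfold Spec_replace_string; infer_instance

-- ===== CLAIM (what is proved, stated in full; the proofs are below) =====
def Claim_equal_replace_string : Prop := ∀ (input_str : String), Dom_replace_string input_str → Spec_replace_string input_str (replace_string input_str)

-- ===== LEMMAS AND PROOFS =====

-- single-character substitution map for key k and replacement v
def pvSub (k : Char) (v : List Char) (c : Char) : List Char := if c = k then v else [c]

-- the combined per-character substitution that both programs realize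
def pvF (c : Char) : List Char :=
  if c = '!' then "{Lshift down}1{Lshift up}".toList
  else if c = '?' then "{Lshift down}7{Lshift up}".toList
  else if c = ':' then "{Lshift down}6{Lshift up}".toList
  else if c = '*' then "{Lshift down}8{Lshift up}".toList
  else if c = '+' then "{Lshift down}={Lshift up}".toList
  else if c = '\n' then [' ']
  else [c]

-- replace with a single-character pattern is a per-character flatMap
theorem pv_go_single (k : Char) (v : List Char) :
    ∀ (l acc : List Char),
      PySem.Chars.replace.go [k] v l.length l acc
        = acc.reverse ++ l.flatMap (pvSub k v) := by
  intro l
  induction l with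
  | nil => intro acc; simp [PySem.Chars.replace.go]
  | cons c t ih =>
      intro acc
      rw [List.length_cons, PySem.Chars.replace.go]
      by_cases h : c = k
      · subst h
        simp [List.isPrefixOf, ih, pvSub]
      · have hp : [k].isPrefixOf (c :: t) = false := by
          simp [List.isPrefixOf]; exact fun he => (h he.symm).elim
        simp [hp, ih, pvSub, h]

theorem pv_replace_single (k : Char) (v s : List Char) :
    PySem.Chars.replace s [k] v = s.flatMap (pvSub k v) := by
  rw [PySem.Chars.replace]
  simp [pv_go_single]

-- A's foldl is the same flatMap of pvF
theorem pv_stepA (c : Char) :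
    (if pvReplacements.contains c then pvReplacements.getD c [] else [c]) = pvF c := by
  by_cases h1 : c = '!' <;> by_cases h2 : c = '?' <;> by_cases h3 : c = ':' <;>
    by_cases h4 : c = '*' <;> by_cases h5 : c = '+' <;> by_cases h6 : c = '\n' <;>
    simp_all [pvReplacements, pvF, PySem.Dict.contains, PySem.Dict.getD,
      PySem.Dict.get?, PySem.Dict.insert, PySem.Dict.empty] <;>
    (try (rintro (rfl | rfl | rfl | rfl | rfl | rfl) <;> simp_all))

theorem pv_A_eq (s : List Char) :
    s.foldl
      (fun acc c =>
        if pvReplacements.contains c then acc ++ pvReplacements.getD c []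
        else acc ++ [c])
      [] = s.flatMap pvF := by
  have : ∀ (l : List Char) (acc : List Char),
      l.foldl (fun acc c =>
        if pvReplacements.contains c then acc ++ pvReplacements.getD c []
        else acc ++ [c]) acc = acc ++ l.flatMap pvF := by
    intro l
    induction l with
    | nil => simp
    | cons c t ih =>
        intro acc
        have := pv_stepA c
        by_cases h : pvReplacements.contains c <;>
          simp_all [List.append_assoc]
  simpa using this s []

-- B's six chained passes are also the flatMap of pvF
theorem pv_B_eq (s : List Char) :
    ((((((s.flatMap (pvSub '!' "{Lshift down}1{Lshift up}".toList)).flatMap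
        (pvSub '?' "{Lshift down}7{Lshift up}".toList)).flatMap
        (pvSub ':' "{Lshift down}6{Lshift up}".toList)).flatMap
        (pvSub '*' "{Lshift down}8{Lshift up}".toList)).flatMap
        (pvSub '+' "{Lshift down}={Lshift up}".toList)).flatMap
        (pvSub '\n' [' '])) = s.flatMap pvF := by
  simp only [List.flatMap_assoc]
  apply List.flatMap_congr
  intro c _
  by_cases h1 : c = '!'
  · subst h1; decide
  by_cases h2 : c = '?'
  · subst h2; decide
  by_cases h3 : c = ':'
  · subst h3; decide
  by_cases h4 : c = '*'
  · subst h4; decide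
  by_cases h5 : c = '+'
  · subst h5; decide
  by_cases h6 : c = '\n'
  · subst h6; decide
  simp [pvSub, pvF, h1, h2, h3, h4, h5, h6]

-- ===== VERDICT (by name: the statement is the Claim_ definition above) =====
theorem replace_string_spec : Claim_equal_replace_string := by
  intro s _
  unfold Spec_replace_string replace_string replace_string_alt
  simp only [PySem.Str.replace, String.toList_ofList,
    show "!".toList = ['!'] from rfl, show "?".toList = ['?'] from rfl,
    show ":".toList = [':'] from rfl, show "*".toList = ['*'] from rfl,
    show "+".toList = ['+'] from rfl, show "\n".toList = ['\n'] from rfl,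
    show " ".toList = [' '] from rfl, pv_replace_single]
  rw [pv_A_eq, ← pv_B_eq]
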